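-- pv_equiv track=rewrite | github.com/phytolrr/phytolrr | scripts/generate_paper_data.py | merge_subgroup
-- ===== SOURCE A (Python) =====
-- import copy
--
-- def merge_subgroup(subgroups_to_types_to_value):
--     total_types_to_value = {}
--     for _, types_to_value in subgroups_to_types_to_value.items():
--         for t, value in types_to_value.items():
--             if t not in total_types_to_value:
--                 total_types_to_value[t] = copy.copy(value)
--             else:
--                 total_types_to_value[t] += value
--     return total_types_to_value
-- ===== SOURCE B (Python) =====
-- def merge_subgroup(subgroups_to_types_to_value):
--     # key-major strategy: flatten everything to a list of (type, value) pairs,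
--     # then for each distinct type (first-seen order) gather all its values in
--     # one scan over the flat list; lists are rebuilt, so nothing aliases input
--     pairs = [(t, v)
--              for types_to_value in subgroups_to_types_to_value.values()
--              for t, v in types_to_value.items()]
--     return {t: [x for t2, v in pairs if t2 == t for x in v]
--             for t in dict.fromkeys(t for t, _ in pairs)}
-- ===== Notes on version B (the rewrite author's own statement) =====
-- stated objective: alternative
-- what changed: A merges item-major in one interleaved pass over the nested dicts with a contains-branch (copy on first sight, += afterwards); B flattens everything into a flat (type, value) pair list and then works key-major: for each distinct type in first-seen order it makes one scan over the flat list gathering that type's values, so no mutable accumulator dict and no presence branch exist.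
import Mathlib
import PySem

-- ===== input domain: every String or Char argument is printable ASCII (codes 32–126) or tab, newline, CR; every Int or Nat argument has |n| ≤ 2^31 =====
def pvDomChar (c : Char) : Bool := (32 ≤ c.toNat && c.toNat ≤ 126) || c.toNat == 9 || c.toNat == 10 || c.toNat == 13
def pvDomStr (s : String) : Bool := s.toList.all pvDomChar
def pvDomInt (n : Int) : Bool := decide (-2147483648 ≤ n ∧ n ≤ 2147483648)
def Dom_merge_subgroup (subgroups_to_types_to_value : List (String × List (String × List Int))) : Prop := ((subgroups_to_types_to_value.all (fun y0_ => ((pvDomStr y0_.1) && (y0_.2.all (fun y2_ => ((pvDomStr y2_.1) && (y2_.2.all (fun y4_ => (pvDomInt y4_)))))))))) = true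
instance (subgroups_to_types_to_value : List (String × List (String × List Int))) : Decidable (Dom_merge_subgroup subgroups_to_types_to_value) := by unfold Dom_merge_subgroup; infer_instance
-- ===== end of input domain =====

-- B is key-major: it flattens to a (type, value) pair list and gathers each distinct
-- type's values with one scan per type, instead of A's item-major branchy dict merge.

-- ===== PORT A =====
-- one interleaved pass: first sight installs a copy of the list, later sights append
def merge_subgroup (subgroups_to_types_to_value : List (String × List (String × List Int))) : List (String × List Int) :=
  (subgroups_to_types_to_value.foldl
    (fun total pair =>
      pair.2.foldl
        (fun total tv =>
          if total.contains tv.1 = false then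
            total.insert tv.1 tv.2                          -- total[t] = copy.copy(value)
          else
            total.insert tv.1 (total.getD tv.1 [] ++ tv.2)) -- total[t] += value
        total)
    PySem.Dict.empty).items

-- ===== PORT B =====
-- pairs = flat list of (t, value); result: for each distinct t (dict.fromkeys = PySem.List.dedup,
-- first-seen order), one gathering scan over pairs, flattening the matching value lists
def merge_subgroup_alt (subgroups_to_types_to_value : List (String × List (String × List Int))) : List (String × List Int) :=
  let pairs := subgroups_to_types_to_value.flatMap (fun p => p.2)
  (PySem.List.dedup (pairs.map Prod.fst)).map
    (fun t => (t, (pairs.filter (fun q => q.1 == t)).flatMap (fun q => q.2)))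

-- ===== PRECONDITION & SPEC =====
def Spec_merge_subgroup (subgroups_to_types_to_value : List (String × List (String × List Int))) (out : List (String × List Int)) : Prop := out = merge_subgroup_alt subgroups_to_types_to_value
instance (subgroups_to_types_to_value : List (String × List (String × List Int))) (out : List (String × List Int)) : Decidable (Spec_merge_subgroup subgroups_to_types_to_value out) := by unfold Spec_merge_subgroup; infer_instance

-- ===== CLAIM =====
def Claim_equal_merge_subgroup : Prop := ∀ (subgroups_to_types_to_value : List (String × List (String × List Int))), Dom_merge_subgroup subgroups_to_types_to_value → Spec_merge_subgroup subgroups_to_types_to_value (merge_subgroup subgroups_to_types_to_value)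

-- ===== LEMMAS AND PROOFS =====

-- abbreviations for the proof: A's inner step, B's gather, B's per-pair-list spec
def pvStep (total : PySem.Dict String (List Int)) (tv : String × List Int) : PySem.Dict String (List Int) :=
  if total.contains tv.1 = false then total.insert tv.1 tv.2
  else total.insert tv.1 (total.getD tv.1 [] ++ tv.2)

def pvGather (t : String) (ps : List (String × List Int)) : List Int :=
  (ps.filter (fun q => q.1 == t)).flatMap (fun q => q.2)

def pvSpec (ps : List (String × List Int)) : List (String × List Int) :=
  (PySem.List.dedup (ps.map Prod.fst)).map (fun t => (t, pvGather t ps))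

-- A's two nested folds are one fold of pvStep over the flattened pair list
theorem pvFoldFlatten (l : List (String × List (String × List Int)))
    (d : PySem.Dict String (List Int)) :
    l.foldl (fun total pair => pair.2.foldl pvStep total) d
      = (l.flatMap (fun p => p.2)).foldl pvStep d := by
  induction l generalizing d with
  | nil => rfl
  | cons p rest ih => simp [List.foldl_append, ih]

theorem pvGather_append (t : String) (ps : List (String × List Int)) (q : String × List Int) :
    pvGather t (ps ++ [q]) = pvGather t ps ++ (if q.1 == t then q.2 else []) := by
  simp only [pvGather, List.filter_append]
  by_cases h : q.1 = t <;> simp [h]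

theorem pvGather_nil_of_not_mem (t : String) (ps : List (String × List Int))
    (h : t ∉ ps.map Prod.fst) : pvGather t ps = [] := by
  unfold pvGather
  have hf : ps.filter (fun q => q.1 == t) = [] := by
    rw [List.filter_eq_nil_iff]
    intro q hq hbeq
    exact h (by
      have : q.1 = t := by simpa using hbeq
      exact this ▸ List.mem_map_of_mem hq)
  rw [hf]; rfl

-- contains on the spec dict tests membership of the key among the pair fsts
theorem pvContains_spec (ps : List (String × List Int)) (t : String) :
    (PySem.Dict.mk (pvSpec ps)).contains t = decide (t ∈ ps.map Prod.fst) := by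
  simp only [PySem.Dict.contains, pvSpec, List.any_map, Function.comp_def, PySem.List.dedup]
  by_cases hm : t ∈ ps.map Prod.fst
  · simp only [hm, decide_true]
    rw [List.any_eq_true]
    exact ⟨t, (PySem.Set.mem_ofList _ t).mpr hm, by simp⟩
  · simp only [hm, decide_false]
    rw [List.any_eq_false]
    intro x hx hbe
    have hxt : x = t := by simpa using hbe
    exact hm (hxt ▸ (PySem.Set.mem_ofList _ x).mp hx)

-- get? on a keyed map with the queried key present
theorem pvGet?_keyed (keys : List String) (g : String → List Int) (t : String)
    (h : t ∈ keys) :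
    (PySem.Dict.mk (keys.map (fun k => (k, g k)))).get? t = some (g t) := by
  induction keys with
  | nil => simp at h
  | cons k rest ih =>
      simp only [List.map_cons, PySem.Dict.get?_mk_cons]
      by_cases hk : k = t
      · simp [hk]
      · have : t ∈ rest := by
          rcases List.mem_cons.mp h with h1 | h1
          · exact absurd h1.symm hk
          · exact h1
        simpa [hk] using ih this

theorem pvGetD_spec (ps : List (String × List Int)) (t : String)
    (h : t ∈ ps.map Prod.fst) :
    (PySem.Dict.mk (pvSpec ps)).getD t [] = pvGather t ps := by
  rw [PySem.Dict.getD_eq_get?_getD]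
  rw [show pvSpec ps = (PySem.List.dedup (ps.map Prod.fst)).map (fun k => (k, pvGather k ps)) from rfl]
  rw [pvGet?_keyed _ _ _ ((PySem.List.mem_dedup _ _).mpr h)]
  rfl

-- the invariant: folding pvStep from the empty dict yields exactly the spec dict
set_option maxRecDepth 8192 in
theorem pvFold_eq_spec (ps : List (String × List Int)) :
    ps.foldl pvStep PySem.Dict.empty = PySem.Dict.mk (pvSpec ps) := by
  induction ps using List.reverseRecOn with
  | nil => rfl
  | append_singleton ps q ih =>
      rw [List.foldl_append, List.foldl_cons, List.foldl_nil, ih]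
      by_cases h : q.1 ∈ ps.map Prod.fst
      · -- key already present: A overwrites in place with the extended list
        have hc : (PySem.Dict.mk (pvSpec ps)).contains q.1 = true := by
          rw [pvContains_spec]; simpa using h
        apply PySem.Dict.ext
        simp only [pvStep, hc, Bool.true_eq_false, ite_false]
        rw [PySem.Dict.items_insert_of_contains _ _ hc, pvGetD_spec _ _ h]
        show _ = pvSpec (ps ++ [q])
        have hkeys : PySem.List.dedup (ps.map Prod.fst ++ [q.1])
            = PySem.List.dedup (ps.map Prod.fst) := by
          rw [show PySem.List.dedup (ps.map Prod.fst ++ [q.1])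
              = PySem.Set.add (PySem.Set.ofList (ps.map Prod.fst)) q.1 from
            PySem.Set.ofList_append_singleton _ _]
          have hs : (PySem.Set.ofList (ps.map Prod.fst)).contains q.1 = true := by
            generalize ps.map Prod.fst = ks at h ⊢
            simpa using (PySem.Set.mem_ofList ks q.1).mpr h
          simp only [PySem.Set.add, hs, PySem.List.dedup]
          simp
        simp only [pvSpec, List.map_append, List.map_cons, List.map_nil, hkeys, List.map_map]
        apply List.map_congr_left
        intro t _
        by_cases ht : t = q.1
        · subst ht
          simp [pvGather_append]
        · have hb : (q.1 == t) = false := beq_eq_false_iff_ne.mpr (Ne.symm ht)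
          simp [pvGather_append, hb, ht]
      · -- new key: A appends a fresh entry at the end
        have hc : (PySem.Dict.mk (pvSpec ps)).contains q.1 = false := by
          rw [pvContains_spec]; simpa using h
        apply PySem.Dict.ext
        simp only [pvStep, hc, ite_true]
        rw [PySem.Dict.items_insert_of_not_contains _ _ hc]
        show _ = pvSpec (ps ++ [q])
        have hkeys : PySem.List.dedup (ps.map Prod.fst ++ [q.1])
            = PySem.List.dedup (ps.map Prod.fst) ++ [q.1] := by
          rw [show PySem.List.dedup (ps.map Prod.fst ++ [q.1])
              = PySem.Set.add (PySem.Set.ofList (ps.map Prod.fst)) q.1 from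
            PySem.Set.ofList_append_singleton _ _]
          have hs : (PySem.Set.ofList (ps.map Prod.fst)).contains q.1 = false := by
            generalize ps.map Prod.fst = ks at h ⊢
            simpa using fun hm => h ((PySem.Set.mem_ofList ks q.1).mp hm)
          simp only [PySem.Set.add, hs, PySem.List.dedup]
          simp
        simp only [pvSpec, List.map_append, List.map_cons, List.map_nil, hkeys]
        congr 1
        · apply List.map_congr_left
          intro t ht
          have htm : t ∈ ps.map Prod.fst := (PySem.List.mem_dedup _ _).mp ht
          have hne : t ≠ q.1 := fun he => h (he ▸ htm)
          have hb : (q.1 == t) = false := beq_eq_false_iff_ne.mpr (Ne.symm hne)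
          simp [pvGather_append, hb]
        · simp [pvGather_append, pvGather_nil_of_not_mem _ _ h]

-- ===== VERDICT =====
theorem merge_subgroup_spec : Claim_equal_merge_subgroup := by
  intro l _
  show merge_subgroup l = merge_subgroup_alt l
  unfold merge_subgroup merge_subgroup_alt
  rw [show (fun (total : PySem.Dict String (List Int)) (tv : String × List Int) =>
      if total.contains tv.1 = false then total.insert tv.1 tv.2
      else total.insert tv.1 (total.getD tv.1 [] ++ tv.2)) = pvStep from rfl]
  rw [pvFoldFlatten, pvFold_eq_spec]
  rfl
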